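-- pv_equiv track=rewrite | github.com/JFincher42/AOC2022 | day23/day23/day23.py | parse
-- ===== SOURCE A (Python) =====
-- def parse(lines):
--     ground = set()
--     minx, maxx, miny, maxy = 0, 0, 0, 0
--     for y in range(len(lines)):
--         for x in range(len(lines[y])):
--             if lines[y][x] == "#":
--                 ground.add((x, y))
--                 minx = min(x, minx)
--                 maxx = max(x, maxx)
--                 miny = min(y, miny)
--                 maxy = max(y, maxy)
--     return ground, minx, maxx, miny, maxy
-- ===== SOURCE B (Python) =====
-- def parse(lines):
--     ground = {
--         (x, y)
--         for y, row in enumerate(lines)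
--         for x, ch in enumerate(row)
--         if ch == "#"
--     }
--     maxx = max((x for x, y in ground), default=0)
--     maxy = max((y for x, y in ground), default=0)
--     return ground, 0, maxx, 0, maxy
-- ===== Notes on version B (the rewrite author's own statement) =====
-- stated objective: simpler
-- what changed: B builds the '#' coordinate set in one set comprehension and then derives the bounds by separate reductions over that set (minx and miny are constantly 0 because coordinates are non-negative and A seeds the running bounds with 0), instead of maintaining four running bounds inside the nested character scan.
import Mathlib
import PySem

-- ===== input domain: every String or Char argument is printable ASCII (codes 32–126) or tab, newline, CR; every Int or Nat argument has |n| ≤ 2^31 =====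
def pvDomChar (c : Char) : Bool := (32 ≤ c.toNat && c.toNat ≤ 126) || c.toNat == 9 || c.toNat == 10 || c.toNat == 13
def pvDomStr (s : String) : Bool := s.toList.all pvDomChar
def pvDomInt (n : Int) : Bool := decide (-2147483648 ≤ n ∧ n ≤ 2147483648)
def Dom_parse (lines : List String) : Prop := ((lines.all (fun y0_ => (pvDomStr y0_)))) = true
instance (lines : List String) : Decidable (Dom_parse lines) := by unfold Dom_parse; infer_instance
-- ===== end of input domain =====

-- B builds the '#' coordinate set with a single comprehension and then computes the
-- bounds by separate reductions over that set (minx/miny are constantly 0), instead of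
-- maintaining all four bounds inside the character scan as A does (objective: simpler).


-- ===== PORT A =====
-- literal transliteration of A: scan y over range(len(lines)), x over range(len(lines[y])),
-- add '#' cells to the set and update the four running bounds in place
def parse (lines : List String) : (List (Int × Int)) × Int × Int × Int × Int :=
  (PySem.List.pyRange 0 (PySem.List.len lines) 1).foldl
    (fun st y =>
      let row := (PySem.List.pyGetD lines y "").toList
      (PySem.List.pyRange 0 (PySem.List.len row) 1).foldl
        (fun st x =>
          if PySem.List.pyGetD row x ' ' = '#' then
            (PySem.Set.add st.1 (x, y), min x st.2.1, max x st.2.2.1,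
             min y st.2.2.2.1, max y st.2.2.2.2)
          else st)
        st)
    ((PySem.Set.empty : PySem.Set (Int × Int)), 0, 0, 0, 0)

-- ===== PORT B =====
-- the set comprehension of Source B: all (x, y) with lines[y][x] == '#', in scan order
def parseCells (lines : List String) : List (Int × Int) :=
  (PySem.List.enumerate lines 0).flatMap (fun yr =>
    (PySem.List.enumerate yr.2.toList 0).filterMap (fun xc =>
      if xc.2 = '#' then some (xc.1, yr.1) else none))

def parse_alt (lines : List String) : (List (Int × Int)) × Int × Int × Int × Int :=
  let ground : PySem.Set (Int × Int) := PySem.Set.ofList (parseCells lines)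
  (ground, 0,
   PySem.List.maxD (ground.map Prod.fst) (fun x => x) 0, 0,
   PySem.List.maxD (ground.map Prod.snd) (fun y => y) 0)

-- ===== PRECONDITION & SPEC =====
def Spec_parse (lines : List String) (out : (List (Int × Int)) × Int × Int × Int × Int) : Prop := out = parse_alt lines
instance (lines : List String) (out : (List (Int × Int)) × Int × Int × Int × Int) : Decidable (Spec_parse lines out) := by unfold Spec_parse; infer_instance

-- ===== CLAIM (what is proved, stated in full; the proofs are below) =====
def Claim_equal_parse : Prop := ∀ (lines : List String), Dom_parse lines → Spec_parse lines (parse lines)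

-- ===== LEMMAS AND PROOFS =====

-- the update A performs for each '#' cell, as one step function over cells
def stepA (st : PySem.Set (Int × Int) × Int × Int × Int × Int) (c : Int × Int) :
    PySem.Set (Int × Int) × Int × Int × Int × Int :=
  (PySem.Set.add st.1 c, min c.1 st.2.1, max c.1 st.2.2.1, min c.2 st.2.2.2.1, max c.2 st.2.2.2.2)

-- a guarded fold is a fold over the filterMap of the guard
theorem foldl_guard_filterMap {α β γ : Type} (l : List α) (p : α → Bool) (h : α → β)
    (f : γ → β → γ) (init : γ) :
    l.foldl (fun acc x => if p x then f acc (h x) else acc) init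
      = (l.filterMap (fun x => if p x then some (h x) else none)).foldl f init := by
  induction l generalizing init with
  | nil => rfl
  | cons a t ih =>
    by_cases hp : p a = true <;> simp [List.foldl_cons, hp, ih]

-- folding over a flatMap is the nested fold
theorem foldl_flatMap' {α β γ : Type} (l : List α) (g : α → List β) (f : γ → β → γ) (init : γ) :
    (l.flatMap g).foldl f init = l.foldl (fun acc x => (g x).foldl f acc) init := by
  induction l generalizing init with
  | nil => rfl
  | cons a t ih => simp [List.flatMap_cons, List.foldl_append, ih]

-- A's nested scan is the fold of stepA over the comprehension's cell list
theorem parse_eq_foldl_cells (lines : List String) :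
    parse lines = (parseCells lines).foldl stepA ((PySem.Set.empty : PySem.Set (Int × Int)), 0, 0, 0, 0) := by
  unfold parse parseCells
  rw [foldl_flatMap']
  rw [PySem.List.enumerate_eq_map_pyRange (d := ""), List.foldl_map]
  refine PySem.List.foldl_congr_mem _ _ _ _ (fun st y _ => ?_)
  dsimp only
  rw [show (fun xc : Int × Char => if xc.2 = '#' then some (xc.1, y) else none)
        = (fun xc : Int × Char => if (xc.2 == '#' : Bool) then some ((fun z : Int × Char => (z.1, y)) xc) else none) from by
        funext xc; simp]
  rw [← foldl_guard_filterMap _ (fun xc : Int × Char => (xc.2 == '#' : Bool)) (fun z => (z.1, y)) stepA st]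
  rw [PySem.List.enumerate_eq_map_pyRange (d := ' '), List.foldl_map]
  refine PySem.List.foldl_congr_mem _ _ _ _ (fun st' x _ => ?_)
  by_cases hx : PySem.List.pyGetD ((PySem.List.pyGetD lines y "").toList) x ' ' = '#' <;>
    simp [hx, stepA]

-- the five accumulators of stepA are independent folds
theorem foldl_stepA_split (l : List (Int × Int)) (s : PySem.Set (Int × Int))
    (m1 m2 m3 m4 : Int) :
    l.foldl stepA (s, m1, m2, m3, m4)
      = (l.foldl PySem.Set.add s,
         l.foldl (fun m c => min c.1 m) m1,
         l.foldl (fun m c => max c.1 m) m2,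
         l.foldl (fun m c => min c.2 m) m3,
         l.foldl (fun m c => max c.2 m) m4) := by
  induction l generalizing s m1 m2 m3 m4 with
  | nil => rfl
  | cons a t ih => simp [List.foldl_cons, stepA, ih]

-- every coordinate produced by the comprehension is non-negative
theorem parseCells_nonneg (lines : List String) :
    ∀ c ∈ parseCells lines, 0 ≤ c.1 ∧ 0 ≤ c.2 := by
  intro c hc
  unfold parseCells at hc
  rw [List.mem_flatMap] at hc
  obtain ⟨yr, hyr, hc⟩ := hc
  rw [List.mem_filterMap] at hc
  obtain ⟨xc, hxc, hc⟩ := hc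
  rw [PySem.List.mem_enumerate_iff] at hyr hxc
  obtain ⟨k, _, hk⟩ := hyr
  obtain ⟨j, _, hj⟩ := hxc
  by_cases h : xc.2 = '#'
  · simp [h] at hc
    subst hj hk
    rw [← hc]
    simp
  · simp [h] at hc

-- running min of non-negative values started at 0 stays 0
theorem foldl_min_nonneg_eq_zero (l : List (Int × Int)) (f : Int × Int → Int)
    (h : ∀ c ∈ l, 0 ≤ f c) :
    l.foldl (fun m c => min (f c) m) 0 = 0 := by
  have hrw : l.foldl (fun m c => min (f c) m) 0 = (l.map f).foldl min 0 := by
    rw [List.foldl_map]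
    exact PySem.List.foldl_congr_mem _ _ _ _ (fun m c _ => min_comm (f c) m)
  rw [hrw]
  rcases PySem.List.foldl_min_mem (l.map f) 0 with h0 | hm
  · exact h0
  · have h1 := (PySem.List.foldl_min_le (l.map f) 0).1
    rw [List.mem_map] at hm
    obtain ⟨c, hc, hce⟩ := hm
    have := h c hc
    omega

-- running max with init 0 depends only on the members of the list
theorem foldl_max_eq_of_mem_iff (l₁ l₂ : List Int) (h : ∀ x, x ∈ l₁ ↔ x ∈ l₂) :
    l₁.foldl max 0 = l₂.foldl max 0 := by
  have key : ∀ (a b : List Int), (∀ x, x ∈ a → x ∈ b) → a.foldl max 0 ≤ b.foldl max 0 := by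
    intro a b hab
    rcases PySem.List.foldl_max_mem a 0 with h0 | hm
    · rw [h0]; exact (PySem.List.le_foldl_max b 0).1
    · exact (PySem.List.le_foldl_max b 0).2 _ (hab _ hm)
  exact le_antisymm (key _ _ fun x => (h x).mp) (key _ _ fun x => (h x).mpr)

-- Source B's max(..., default=0) over non-negative values is the running max started at 0
theorem maxD_eq_foldl_max (l : List Int) (h : ∀ x ∈ l, 0 ≤ x) :
    PySem.List.maxD l (fun x => x) 0 = l.foldl max 0 := by
  cases l with
  | nil => rfl
  | cons a t =>
    unfold PySem.List.maxD
    rw [PySem.List.max?_id_cons]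
    have ha : 0 ≤ a := h a (List.mem_cons_self)
    simp [List.foldl_cons, max_eq_right ha]

-- A's running max over cells equals B's reduction over the deduplicated set
theorem max_component_eq (lines : List String) (f : Int × Int → Int)
    (hf : ∀ c ∈ parseCells lines, 0 ≤ f c) :
    (parseCells lines).foldl (fun m c => max (f c) m) 0
      = PySem.List.maxD ((PySem.Set.ofList (parseCells lines)).map f) (fun x => x) 0 := by
  have hrw : (parseCells lines).foldl (fun m c => max (f c) m) 0
      = ((parseCells lines).map f).foldl max 0 := by
    rw [List.foldl_map]
    exact PySem.List.foldl_congr_mem _ _ _ _ (fun m c _ => max_comm (f c) m)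
  have hnn : ∀ x ∈ (PySem.Set.ofList (parseCells lines)).map f, 0 ≤ x := by
    intro x hx
    rw [List.mem_map] at hx
    obtain ⟨c, hc, hce⟩ := hx
    rw [PySem.Set.mem_ofList] at hc
    exact hce ▸ hf c hc
  rw [hrw, maxD_eq_foldl_max _ hnn]
  refine foldl_max_eq_of_mem_iff _ _ (fun x => ?_)
  simp only [List.mem_map, PySem.Set.mem_ofList]

-- ===== VERDICT (by name: the statement is the Claim_ definition above) =====
theorem parse_spec : Claim_equal_parse := by
  intro lines _
  unfold Spec_parse parse_alt
  rw [parse_eq_foldl_cells, foldl_stepA_split]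
  have hnn := parseCells_nonneg lines
  refine Prod.ext ?_ (Prod.ext ?_ (Prod.ext ?_ (Prod.ext ?_ ?_))) <;> simp only
  · rw [PySem.Set.ofList_eq_foldl]; rfl
  · exact foldl_min_nonneg_eq_zero _ Prod.fst (fun c hc => (hnn c hc).1)
  · exact max_component_eq lines Prod.fst (fun c hc => (hnn c hc).1)
  · exact foldl_min_nonneg_eq_zero _ Prod.snd (fun c hc => (hnn c hc).2)
  · exact max_component_eq lines Prod.snd (fun c hc => (hnn c hc).2)
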